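-- pv_equiv track=rewrite | github.com/grihabor/msu.mfk | mfk.py | students_course_count
-- ===== SOURCE A (Python) =====
-- def students_course_count(students):
--     course_count = {}
--     for id, student in students.items():
--         try:
--             course_count[len(student['courses'])] += 1
--         except KeyError:
--             course_count[len(student['courses'])] = 1
--
--     return course_count
-- ===== SOURCE B (Python) =====
-- def students_course_count(students):
--     lengths = [len(s['courses']) for s in students.values()]
--
--     def group(ls):
--         if not ls:
--             return []
--         v = ls[0]
--         return [(v, ls.count(v))] + group([x for x in ls[1:] if x != v])
--
--     return dict(group(lengths))
-- ===== Notes on version B (the rewrite author's own statement) =====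
-- stated objective: alternative
-- what changed: Replaces A's incremental try/except hash-counting loop with a recursive partition: extract the course-length list, then repeatedly take its first value, record its count, and recurse on the list with that value filtered out, finally wrapping the (value,count) pairs in dict().
import Mathlib
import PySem

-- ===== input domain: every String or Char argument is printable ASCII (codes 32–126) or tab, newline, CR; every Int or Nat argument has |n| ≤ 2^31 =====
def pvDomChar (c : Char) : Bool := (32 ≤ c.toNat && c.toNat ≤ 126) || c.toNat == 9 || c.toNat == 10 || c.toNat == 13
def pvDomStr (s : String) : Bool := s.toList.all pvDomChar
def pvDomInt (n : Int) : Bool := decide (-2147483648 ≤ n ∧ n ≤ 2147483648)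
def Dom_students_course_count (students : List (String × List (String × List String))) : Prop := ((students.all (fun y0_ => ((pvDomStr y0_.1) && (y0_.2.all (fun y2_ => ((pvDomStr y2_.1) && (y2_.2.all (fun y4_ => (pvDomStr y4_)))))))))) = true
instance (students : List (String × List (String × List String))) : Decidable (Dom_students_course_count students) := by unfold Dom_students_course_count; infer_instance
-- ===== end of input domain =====

-- ===== PORT A =====
-- B replaces A's incremental hash-counting loop by a recursive partition of the course-length list
-- (take the first value, count it, recurse on the list with that value filtered out); alternative decomposition, same result.
-- Port of A. The try/except KeyError increment is Dict.modify k 0 (·+1); student['courses'] is ported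
-- totally with getD [] — Pre_ excludes the inputs (a student without 'courses' key) where Python raises KeyError.
def students_course_count (students : List (String × List (String × List String))) : List (Int × Int) :=
  ((PySem.Dict.ofList students).items.foldl
    (fun cc p =>
      cc.modify (((PySem.Dict.ofList p.2).getD "courses" []).length : Int) 0 (· + 1))
    PySem.Dict.empty).items

-- ===== PORT B =====
-- helper 'group' of Source B: head value, its count in the remaining list, recurse on the list with it filtered out
def sccGroup (ls : List Int) : List (Int × Int) :=
  match ls with
  | [] => []
  | v :: t =>
      (v, (PySem.List.count (v :: t) v : Int)) :: sccGroup (t.filter (fun x => x != v))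
termination_by ls.length
decreasing_by
  have := List.length_filter_le (fun x => x != v) t
  simp; omega

def students_course_count_alt (students : List (String × List (String × List String))) : List (Int × Int) :=
  let lengths := (PySem.Dict.ofList students).values.map
      (fun s => (((PySem.Dict.ofList s).getD "courses" []).length : Int))
  (PySem.Dict.ofList (sccGroup lengths)).items

-- ===== PRECONDITION & SPEC =====
-- Pre_ excludes exactly the inputs where some student (surviving dict key dedup) has no 'courses' key: there Python A raises KeyError (and B raises too).
def Pre_students_course_count (students : List (String × List (String × List String))) : Prop :=
  ∀ p ∈ (PySem.Dict.ofList students).items, (PySem.Dict.ofList p.2).contains "courses" = true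
instance (students : List (String × List (String × List String))) : Decidable (Pre_students_course_count students) := by unfold Pre_students_course_count; infer_instance
def pvWitness_students_course_count : (List (String × List (String × List String))) :=
  [("alice", [("courses", ["algebra", "analysis"])]), ("bob", [("courses", ["algebra"])])]
def Spec_students_course_count (students : List (String × List (String × List String))) (out : List (Int × Int)) : Prop := out = students_course_count_alt students
instance (students : List (String × List (String × List String))) (out : List (Int × Int)) : Decidable (Spec_students_course_count students out) := by unfold Spec_students_course_count; infer_instance

-- ===== CLAIM (what is proved, stated in full; the proofs are below) =====
def Claim_equal_students_course_count : Prop := ∀ (students : List (String × List (String × List String))), Dom_students_course_count students → Pre_students_course_count students → Spec_students_course_count students (students_course_count students)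

-- ===== LEMMAS AND PROOFS =====

-- filtering a value out commutes with order-preserving dedup
theorem sccOfList_filter (t : List Int) (v : Int) :
    PySem.Set.ofList (t.filter (fun x => x != v)) = (PySem.Set.ofList t).discard v := by
  induction t with
  | nil => rfl
  | cons x t ih =>
    by_cases hxv : x = v
    · subst hxv
      simp only [List.filter_cons, bne_self_eq_false, Bool.false_eq_true, if_false,
        PySem.Set.ofList_cons, ih, PySem.Set.discard, List.filter_cons, beq_self_eq_true,
        Bool.not_true, Bool.false_eq_true, if_false, List.filter_filter]
      simp
    · have hb : (x != v) = true := by simp [hxv]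
      simp only [List.filter_cons, hb, if_true, PySem.Set.ofList_cons, ih,
        PySem.Set.discard, List.filter_cons, List.filter_filter]
      have : (!x == v) = true := by simp [hxv]
      simp only [this, if_true, List.cons.injEq, true_and]
      congr 1
      ext y
      simp [Bool.and_comm]

-- sccGroup computes, for each distinct value in first-occurrence order, its multiplicity
theorem sccGroup_eq (L : List Int) :
    sccGroup L = (PySem.Set.ofList L).map (fun k => (k, (PySem.List.count L k : Int))) := by
  induction hn : L.length using Nat.strong_induction_on generalizing L with
  | _ n ih =>
    match L with
    | [] => simp [sccGroup, PySem.Set.ofList]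
    | v :: t =>
      have hlen : (t.filter (fun x => x != v)).length < n := by
        have := List.length_filter_le (fun x => x != v) t
        simp at hn; omega
      rw [sccGroup, ih _ hlen _ rfl, PySem.Set.ofList_cons, List.map_cons,
        ← sccOfList_filter t v]
      congr 1
      apply List.map_congr_left
      intro k hk
      have hkm : k ∈ t.filter (fun x => x != v) := by
        simpa [PySem.Set.mem_ofList] using hk
      have hkv : k ≠ v := by
        have := List.of_mem_filter hkm
        simpa using this
      simp only [Prod.mk.injEq, true_and, PySem.List.count]
      rw [List.count_filter (by simp [hkv])]
      simp [Ne.symm hkv]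

-- keys produced by sccGroup are exactly the distinct values, hence nodup
theorem sccGroup_keys (L : List Int) :
    (sccGroup L).map (·.1) = PySem.Set.ofList L := by
  rw [sccGroup_eq, List.map_map]
  simp [Function.comp_def]

-- dict(pairs) on nodup keys lists exactly those pairs
theorem sccDict_items (L : List Int) :
    (PySem.Dict.ofList (sccGroup L)).items = sccGroup L := by
  have h : PySem.Dict.ofList (sccGroup L)
      = (sccGroup L).foldl (fun d p => d.insert p.1 p.2) PySem.Dict.empty := rfl
  rw [h, PySem.Dict.items_foldl_insert_fresh (sccGroup L) (·.1) (·.2) PySem.Dict.empty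
    (by intro a _; simp [PySem.Dict.contains_empty])
    (by rw [sccGroup_keys]; exact PySem.Set.nodup_ofList L)]
  simp [PySem.Dict.empty]

-- ===== VERDICT (by name: the statement is the Claim_ definition above) =====
theorem students_course_count_spec : Claim_equal_students_course_count := by
  intro students _ _
  unfold Spec_students_course_count students_course_count students_course_count_alt
  rw [show (List.foldl (fun cc p => cc.modify (((PySem.Dict.ofList p.2).getD "courses" []).length : Int) 0 (· + 1))
        PySem.Dict.empty (PySem.Dict.ofList students).items)
      = PySem.Dict.counter (((PySem.Dict.ofList students).items).map
          (fun p => (((PySem.Dict.ofList p.2).getD "courses" []).length : Int))) from by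
        rw [PySem.Dict.counter_eq_foldl, List.foldl_map],
      PySem.Dict.items_counter]
  rw [sccDict_items, sccGroup_eq]
  simp [PySem.Dict.values, List.map_map, Function.comp_def, PySem.List.count]
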